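-- pv_equiv track=rewrite | github.com/pbitutsky/CS-170-Final-Project | util.py | constraint_satisfaction
-- ===== SOURCE A (Python) =====
-- def constraint_satisfaction(ordering, constraints):
--     total_passed = 0
--     constraint_violations = {key: 0 for key in ordering}
--     for c in constraints:
--         if ordering[c[2]] > ordering[c[1]] or ordering[c[2]] < ordering[c[0]]:
--             total_passed += 1
--         else:
--             constraint_violations[c[0]] += 1
--             constraint_violations[c[1]] += 1
--             constraint_violations[c[2]] += 1
--     return total_passed, constraint_violations, max(constraint_violations, key=lambda x: constraint_violations[x])
-- ===== SOURCE B (Python) =====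
-- def constraint_satisfaction(ordering, constraints):
--     violated = [c for c in constraints
--                 if not (ordering[c[2]] > ordering[c[1]] or ordering[c[2]] < ordering[c[0]])]
--     total_passed = len(constraints) - len(violated)
--     bad = sorted(k for c in violated for k in c)
--     counts = {}
--     i = 0
--     while i < len(bad):
--         j = i + 1
--         while j < len(bad) and bad[j] == bad[i]:
--             j += 1
--         counts[bad[i]] = j - i
--         i = j
--     constraint_violations = {key: counts.get(key, 0) for key in ordering}
--     worst = min(constraint_violations, key=lambda k: -constraint_violations[k])
--     return total_passed, constraint_violations, worst
-- ===== Notes on version B (the rewrite author's own statement) =====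
-- stated objective: alternative
-- what changed: A's single coupled loop with three per-violation dict increments is replaced by a sort-then-scan algorithm: the violated constraints' keys are flattened, sorted, and counted by run-length over adjacent equal runs; total_passed is the complement len(constraints)-len(violated), the violations dict is rebuilt over the ordering keys from the run-length table, and the argmax is min over the negated counts.
import Mathlib
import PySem

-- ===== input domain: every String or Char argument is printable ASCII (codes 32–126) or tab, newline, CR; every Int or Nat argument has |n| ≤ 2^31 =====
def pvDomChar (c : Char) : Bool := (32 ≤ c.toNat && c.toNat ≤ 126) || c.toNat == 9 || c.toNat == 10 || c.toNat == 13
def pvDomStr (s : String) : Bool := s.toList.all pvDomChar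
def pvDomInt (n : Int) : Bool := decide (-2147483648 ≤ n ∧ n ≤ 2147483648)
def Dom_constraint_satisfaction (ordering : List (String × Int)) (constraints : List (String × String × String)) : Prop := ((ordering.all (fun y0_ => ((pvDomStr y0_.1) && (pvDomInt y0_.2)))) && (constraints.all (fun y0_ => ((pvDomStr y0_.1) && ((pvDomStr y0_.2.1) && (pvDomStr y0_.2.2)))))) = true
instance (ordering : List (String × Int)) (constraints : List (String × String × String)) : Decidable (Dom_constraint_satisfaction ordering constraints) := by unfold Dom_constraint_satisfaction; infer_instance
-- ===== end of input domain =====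

-- B recomputes the same result by a different algorithm: filter the violated constraints once,
-- total by complement, sort the flattened offending keys and count them by run-length scan,
-- rebuild the dict from that table, argmax as min over negated counts (objective: alternative).


-- ===== PORT A =====
-- ordering is a Python dict, represented by its item list; PySem.Dict.ofList gives dict(pairs) semantics.
-- 'ordering[c[i]]' / 'constraint_violations[k] += 1' raise KeyError on a missing key and 'max' of an empty
-- dict raises ValueError; exactly those inputs are excluded by Pre_ below, so getD/modify are exact there.
def constraint_satisfaction (ordering : List (String × Int)) (constraints : List (String × String × String)) : Int × (List (String × Int)) × String :=
  let d := PySem.Dict.ofList ordering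
  let cv0 := d.keys.foldl (fun cv k => cv.insert k (0 : Int)) PySem.Dict.empty
  let st := constraints.foldl (fun (st : Int × PySem.Dict String Int) c =>
      if d.getD c.2.2 0 > d.getD c.2.1 0 || d.getD c.2.2 0 < d.getD c.1 0 then
        (st.1 + 1, st.2)
      else
        (st.1, ((st.2.modify c.1 0 (· + 1)).modify c.2.1 0 (· + 1)).modify c.2.2 0 (· + 1)))
    ((0 : Int), cv0)
  let maxKey := match st.2.keys with
    | [] => ""  -- unreachable under Pre_ (Python's max raises ValueError here)
    | k :: ks => ks.foldl (fun b x => if st.2.getD x 0 > st.2.getD b 0 then x else b) k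
  (st.1, st.2.items, maxKey)

-- ===== PORT B =====
-- B-side helper: 'the constraint is satisfied' test from Source B's filter
def pvSat (d : PySem.Dict String Int) (c : String × String × String) : Bool :=
  d.getD c.2.2 0 > d.getD c.2.1 0 || d.getD c.2.2 0 < d.getD c.1 0

-- B-side helper: Source B's index-based run-length while loop over the sorted key list.
-- 'j = i + 1; while j < len and bad[j] == bad[i]: j += 1; counts[bad[i]] = j - i; i = j' is exactly:
-- the run 1 + takeWhile (== head) and continuing on dropWhile (== head) (exact: indices only move forward).
def pvRunLen : List String → PySem.Dict String Int → PySem.Dict String Int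
  | [], counts => counts
  | k :: rest, counts =>
      pvRunLen (rest.dropWhile (fun x => x == k))
        (counts.insert k (1 + ((rest.takeWhile (fun x => x == k)).length : Int)))
  termination_by bs _ => bs.length
  decreasing_by
    simp only [List.length_cons]
    have := List.length_dropWhile_le (fun x => x == k) rest
    omega

def constraint_satisfaction_alt (ordering : List (String × Int)) (constraints : List (String × String × String)) : Int × (List (String × Int)) × String :=
  let d := PySem.Dict.ofList ordering
  let violated := constraints.filter (fun c => !pvSat d c)
  let total := PySem.List.len constraints - PySem.List.len violated
  let bad := PySem.List.sorted (violated.flatMap (fun c => [c.1, c.2.1, c.2.2])) (fun k => k) false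
  let counts := pvRunLen bad PySem.Dict.empty
  let cv := d.keys.foldl (fun cv k => cv.insert k (counts.getD k 0)) PySem.Dict.empty
  let worst := PySem.List.min? d.keys (fun k => -(cv.getD k 0))
  (total, cv.items, worst.getD "")  -- worst = some _ under Pre_ (Python's min raises ValueError on an empty dict)

-- ===== PRECONDITION & SPEC =====
-- Pre_ excludes exactly the inputs where the Python A raises: an empty ordering (max() → ValueError) and a
-- constraint whose actually-evaluated key is missing from ordering (KeyError); c[0] is only evaluated when
-- the first comparison is false, hence the disjunction.
def Pre_constraint_satisfaction (ordering : List (String × Int)) (constraints : List (String × String × String)) : Prop :=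
  ordering ≠ [] ∧ ∀ c ∈ constraints,
    c.2.2 ∈ ordering.map Prod.fst ∧ c.2.1 ∈ ordering.map Prod.fst ∧
    ((PySem.Dict.ofList ordering).getD c.2.2 0 > (PySem.Dict.ofList ordering).getD c.2.1 0 ∨
      c.1 ∈ ordering.map Prod.fst)
instance (ordering : List (String × Int)) (constraints : List (String × String × String)) : Decidable (Pre_constraint_satisfaction ordering constraints) := by unfold Pre_constraint_satisfaction; infer_instance

def pvWitness_constraint_satisfaction : (List (String × Int)) × (List (String × String × String)) :=
  ([("a", 0), ("b", 1)], [("a", "b", "b")])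

def Spec_constraint_satisfaction (ordering : List (String × Int)) (constraints : List (String × String × String)) (out : Int × (List (String × Int)) × String) : Prop := out = constraint_satisfaction_alt ordering constraints
instance (ordering : List (String × Int)) (constraints : List (String × String × String)) (out : Int × (List (String × Int)) × String) : Decidable (Spec_constraint_satisfaction ordering constraints out) := by unfold Spec_constraint_satisfaction; infer_instance

-- ===== CLAIM (what is proved, stated in full; the proofs are below) =====
def Claim_equal_constraint_satisfaction : Prop := ∀ (ordering : List (String × Int)) (constraints : List (String × String × String)), Dom_constraint_satisfaction ordering constraints → Pre_constraint_satisfaction ordering constraints → Spec_constraint_satisfaction ordering constraints (constraint_satisfaction ordering constraints)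

-- ===== LEMMAS AND PROOFS =====

-- A's triple increment, as a helper for the lemmas only
def pvTrip (cv : PySem.Dict String Int) (c : String × String × String) : PySem.Dict String Int :=
  ((cv.modify c.1 0 (· + 1)).modify c.2.1 0 (· + 1)).modify c.2.2 0 (· + 1)

-- B's flattened list of keys of violated constraints (proof-only abbreviation)
def pvBad (d : PySem.Dict String Int) (cs : List (String × String × String)) : List String :=
  (cs.filter (fun c => !pvSat d c)).flatMap (fun c => [c.1, c.2.1, c.2.2])

-- A's coupled loop is its two component loops
theorem pv_loop_split (d : PySem.Dict String Int) (cs : List (String × String × String))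
    (t : Int) (cv : PySem.Dict String Int) :
    cs.foldl (fun st c => if pvSat d c then (st.1 + 1, st.2) else (st.1, pvTrip st.2 c)) (t, cv)
      = (cs.foldl (fun t c => if pvSat d c then t + 1 else t) t,
         cs.foldl (fun cv c => if pvSat d c then cv else pvTrip cv c) cv) := by
  induction cs generalizing t cv with
  | nil => rfl
  | cons c cs ih =>
    simp only [List.foldl_cons]
    by_cases h : pvSat d c <;> simp [h, ih]

-- A's count of satisfied constraints is the complement count B computes
theorem pv_total_eq (d : PySem.Dict String Int) (cs : List (String × String × String)) :
    cs.foldl (fun t c => if pvSat d c then t + 1 else t) (0 : Int)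
      = (cs.length : Int) - ((cs.filter (fun c => !pvSat d c)).length : Int) := by
  rw [PySem.List.foldl_count_if, ← List.countP_eq_length_filter]
  induction cs with
  | nil => rfl
  | cons c cs ih =>
    rw [List.countP_cons, List.countP_cons, List.length_cons]
    by_cases h : pvSat d c
    · rw [if_pos h, if_neg (by simp [h])]
      omega
    · rw [if_neg h, if_pos (by simp [h])]
      omega

-- A's violation loop is a single modify-loop over B's flattened bad-key list
theorem pv_cv_loop_eq (d : PySem.Dict String Int) (cs : List (String × String × String))
    (cv : PySem.Dict String Int) :
    cs.foldl (fun cv c => if pvSat d c then cv else pvTrip cv c) cv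
      = (pvBad d cs).foldl (fun cv k => cv.modify k 0 (· + 1)) cv := by
  induction cs generalizing cv with
  | nil => rfl
  | cons c cs ih =>
    simp only [List.foldl_cons, pvBad, List.filter_cons]
    by_cases h : pvSat d c
    · simpa [h, pvBad] using ih cv
    · simp only [h, Bool.not_false, if_neg, Bool.false_eq_true, not_false_iff]
      rw [ih (pvTrip cv c)]
      simp [pvTrip, pvBad, List.foldl_cons]

-- a zero-initialisation loop looks up to 0 everywhere
theorem pv_getD_init (L : List String) (dd : PySem.Dict String Int)
    (h : ∀ j, dd.getD j 0 = 0) (k : String) :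
    (L.foldl (fun cv k => cv.insert k (0 : Int)) dd).getD k 0 = 0 := by
  induction L generalizing dd with
  | nil => exact h k
  | cons x L ih =>
    refine ih _ (fun j => ?_)
    rw [PySem.Dict.getD_insert]
    split <;> simp [h]

-- Set.update by already-present elements is the identity
theorem pv_set_update_id (s : PySem.Set String) (xs : List String) (h : ∀ x ∈ xs, x ∈ s) :
    PySem.Set.update s xs = s := by
  rw [PySem.Set.update_eq_append_filter]
  have : (PySem.Set.ofList xs).filter (fun y => !(PySem.Set.contains s y)) = [] := by
    rw [List.filter_eq_nil_iff]
    intro y hy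
    have hm : y ∈ s := h y ((PySem.Set.mem_ofList xs y).1 hy)
    simp [PySem.Set.contains_eq_listContains, hm]
  rw [this, List.append_nil]

-- keys of ofList are the distinct first keys
theorem pv_keys_ofList (l : List (String × Int)) :
    (PySem.Dict.ofList l).keys = PySem.Set.ofList (l.map Prod.fst) := by
  show (l.foldl (fun acc p => acc.insert p.1 p.2) PySem.Dict.empty).keys = _
  rw [PySem.Dict.keys_foldl_insert_key l Prod.fst (fun _ p => p.2)]
  simp [PySem.Dict.keys_empty, PySem.Set.update_nil_left]

-- on a ≤-sorted list the run-length loop tabulates exactly the multiplicities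
theorem pv_runLen_getD (bs : List String) (counts : PySem.Dict String Int)
    (hs : bs.Pairwise (· ≤ ·)) (k : String) :
    (pvRunLen bs counts).getD k 0 = if k ∈ bs then (bs.count k : Int) else counts.getD k 0 := by
  induction bs, counts using pvRunLen.induct with
  | case1 counts => simp [pvRunLen]
  | case2 k0 rest counts ih =>
    have hrest : rest.Pairwise (· ≤ ·) := hs.of_cons
    have hge : ∀ y ∈ rest, k0 ≤ y := fun y hy => (List.pairwise_cons.1 hs).1 y hy
    have hdp : (rest.dropWhile (fun x => x == k0)).Pairwise (· ≤ ·) :=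
      hrest.sublist (List.dropWhile_sublist _)
    -- k0 does not occur after its initial run
    have hk0 : k0 ∉ rest.dropWhile (fun x => x == k0) := by
      intro hmem
      cases hdw : rest.dropWhile (fun x => x == k0) with
      | nil => simp [hdw] at hmem
      | cons x r' =>
        have hxne : (x == k0) = false := by
          have := List.head_dropWhile_not (fun x => x == k0) (l := rest) (by simp [hdw])
          simpa [hdw] using this
        have hxrest : x ∈ rest := (List.dropWhile_sublist _).mem (by rw [hdw]; simp)
        have hk0x : k0 ≤ x := hge x hxrest
        rw [hdw] at hmem
        rcases List.mem_cons.1 hmem with rfl | hmem'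
        · simp at hxne
        · have hxk0 : x ≤ k0 := (List.pairwise_cons.1 (hdw ▸ hdp)).1 k0 hmem'
          have : x = k0 := le_antisymm hxk0 hk0x
          simp [this] at hxne
    have hsplit : rest = rest.takeWhile (fun x => x == k0) ++ rest.dropWhile (fun x => x == k0) :=
      (List.takeWhile_append_dropWhile).symm
    have htw : ∀ x ∈ rest.takeWhile (fun x => x == k0), x = k0 := by
      intro x hx
      have := List.mem_takeWhile_imp hx
      simpa using this
    rw [pvRunLen, ih hdp]
    by_cases hkk0 : k = k0
    · subst hkk0
      simp only [hk0, List.mem_cons, true_or, if_pos]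
      rw [PySem.Dict.getD_insert]
      simp only [if_pos]
      have hcnt : rest.count k = (rest.takeWhile (fun x => x == k)).length := by
        conv_lhs => rw [hsplit]
        rw [List.count_append, List.count_eq_zero_of_not_mem hk0, Nat.add_zero]
        exact List.count_eq_length.2 (fun x hx => by simp [htw x hx])
      simp [List.count_cons_self, hcnt]
      ring
    · have hcnt2 : k ∈ rest.dropWhile (fun x => x == k0) → rest.count k = (rest.dropWhile (fun x => x == k0)).count k := by
        intro _
        conv_lhs => rw [hsplit]
        rw [List.count_append, List.count_eq_zero_of_not_mem, Nat.zero_add]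
        intro hx
        exact hkk0 (htw k hx)
      by_cases hmem : k ∈ rest.dropWhile (fun x => x == k0)
      · have hkrest : k ∈ rest := (List.dropWhile_sublist _).mem hmem
        simp only [hmem, if_pos, List.mem_cons, hkrest, or_true, if_pos]
        rw [List.count_cons_of_ne (Ne.symm hkk0), hcnt2 hmem]
      · simp only [hmem]
        have hknotin : k ∉ k0 :: rest := by
          intro hx
          rcases List.mem_cons.1 hx with rfl | hx'
          · exact hkk0 rfl
          · rw [hsplit] at hx'
            rcases List.mem_append.1 hx' with hx'' | hx''
            · exact hkk0 (htw k hx'')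
            · exact hmem hx''
        rw [if_neg hknotin, PySem.Dict.getD_insert]
        simp [hkk0]

-- the run-length table over the sorted bad list looks up to the plain multiset count
theorem pv_counts_eq (bad : List String) (k : String) :
    (pvRunLen (PySem.List.sorted bad (fun k => k) false) PySem.Dict.empty).getD k 0
      = (bad.count k : Int) := by
  have hperm : (PySem.List.sorted bad (fun k => k) false).Perm bad := PySem.List.sorted_perm _ _ _
  have hpw : (PySem.List.sorted bad (fun k => k) false).Pairwise (· ≤ ·) := by
    simpa using PySem.List.sorted_pairwise bad (fun k => k)
  rw [pv_runLen_getD _ _ hpw k]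
  by_cases hm : k ∈ PySem.List.sorted bad (fun k => k) false
  · rw [if_pos hm, hperm.count_eq]
  · rw [if_neg hm, PySem.Dict.getD_empty]
    have hnb : k ∉ bad := fun h => hm (hperm.mem_iff.2 h)
    rw [List.count_eq_zero_of_not_mem hnb]
    rfl

-- Python's min(keys, key=f) is the seeded running-minimum loop
theorem pv_min_eq (f : String → Int) (x : String) (t : List String) :
    PySem.List.min? (x :: t) f = some (t.foldl (fun b y => if f y < f b then y else b) x) := by
  simp only [PySem.List.min?, List.foldl_cons]
  induction t generalizing x with
  | nil => rfl
  | cons y t ih =>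
    simp only [List.foldl_cons]
    by_cases h : f y < f x <;> simp [h, ih]

-- characterisation of port A through the B-side vocabulary (definitional up to the loop lemmas)
theorem pvA_char (ordering : List (String × Int)) (constraints : List (String × String × String)) :
    constraint_satisfaction ordering constraints =
      (let d := PySem.Dict.ofList ordering
       let cv0 := d.keys.foldl (fun cv k => cv.insert k (0 : Int)) PySem.Dict.empty
       let cv := (pvBad d constraints).foldl (fun cv k => cv.modify k 0 (· + 1)) cv0
       ((constraints.length : Int) - ((constraints.filter (fun c => !pvSat d c)).length : Int),
        cv.items,
        match cv.keys with
        | [] => ""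
        | k :: ks => ks.foldl (fun b x => if cv.getD x 0 > cv.getD b 0 then x else b) k)) := by
  show (let d := PySem.Dict.ofList ordering
        let cv0 := d.keys.foldl (fun cv k => cv.insert k (0 : Int)) PySem.Dict.empty
        let st := constraints.foldl
          (fun (st : Int × PySem.Dict String Int) c =>
            if pvSat d c then (st.1 + 1, st.2) else (st.1, pvTrip st.2 c)) ((0 : Int), cv0)
        let maxKey := match st.2.keys with
          | [] => ""
          | k :: ks => ks.foldl (fun b x => if st.2.getD x 0 > st.2.getD b 0 then x else b) k
        (st.1, st.2.items, maxKey)) = _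
  simp only [pv_loop_split, pv_cv_loop_eq, pv_total_eq]

-- characterisation of port B through the same vocabulary (definitional)
theorem pvB_char (ordering : List (String × Int)) (constraints : List (String × String × String)) :
    constraint_satisfaction_alt ordering constraints =
      (let d := PySem.Dict.ofList ordering
       let counts := pvRunLen (PySem.List.sorted (pvBad d constraints) (fun k => k) false) PySem.Dict.empty
       let cv := d.keys.foldl (fun cv k => cv.insert k (counts.getD k 0)) PySem.Dict.empty
       ((constraints.length : Int) - ((constraints.filter (fun c => !pvSat d c)).length : Int),
        cv.items,
        (PySem.List.min? d.keys (fun k => -(cv.getD k 0))).getD "")) := by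
  simp only [constraint_satisfaction_alt, pvBad, PySem.List.len_eq]

-- ===== VERDICT (by name: the statement is the Claim_ definition above) =====
theorem constraint_satisfaction_spec : Claim_equal_constraint_satisfaction := by
  intro ordering constraints _ hPre
  obtain ⟨hne, hc⟩ := hPre
  unfold Spec_constraint_satisfaction
  rw [pvA_char, pvB_char]
  simp only []
  set d := PySem.Dict.ofList ordering with hd
  set K := d.keys with hKdef
  set bad := pvBad d constraints with hbad
  set cv0 := K.foldl (fun cv k => cv.insert k (0 : Int)) PySem.Dict.empty with hcv0def
  set cvA := bad.foldl (fun cv k => cv.modify k 0 (· + 1)) cv0 with hcvA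
  set counts := pvRunLen (PySem.List.sorted bad (fun k => k) false) PySem.Dict.empty with hcounts
  set cvB := K.foldl (fun cv k => cv.insert k (counts.getD k 0)) PySem.Dict.empty with hcvB
  -- basic facts about the key list
  have hK : K = PySem.Set.ofList (ordering.map Prod.fst) := pv_keys_ofList ordering
  have hnd : K.Nodup := PySem.Dict.nodup_keys_ofList ordering
  have hmem : ∀ x, x ∈ ordering.map Prod.fst → x ∈ K := by
    intro x hx; rw [hK]; exact (PySem.Set.mem_ofList _ _).2 hx
  have hKne : K ≠ [] := by
    obtain ⟨p, rest, rfl⟩ := List.exists_cons_of_ne_nil hne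
    exact List.ne_nil_of_mem (hmem p.1 (by simp))
  -- every bad key is an ordering key
  have hbadK : ∀ x ∈ bad, x ∈ K := by
    intro x hx
    rw [hbad] at hx; unfold pvBad at hx
    rw [List.mem_flatMap] at hx
    obtain ⟨c, hcf, hx3⟩ := hx
    rw [List.mem_filter] at hcf
    obtain ⟨hcmem, hns⟩ := hcf
    obtain ⟨h22, h21, hdisj⟩ := hc c hcmem
    have h1 : c.1 ∈ ordering.map Prod.fst := by
      rcases hdisj with hgt | h1
      · exfalso
        have : pvSat d c = true := by
          unfold pvSat
          simp only [Bool.or_eq_true, decide_eq_true_eq]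
          exact Or.inl hgt
        simp [this] at hns
      · exact h1
    simp only [List.mem_cons, List.not_mem_nil, or_false] at hx3
    rcases hx3 with rfl | rfl | rfl
    · exact hmem _ h1
    · exact hmem _ h21
    · exact hmem _ h22
  -- the zero-initialised dict
  have hcv0 : ∀ k, cv0.getD k 0 = 0 := by
    intro k
    exact pv_getD_init K PySem.Dict.empty (fun j => by simp [PySem.Dict.getD_empty]) k
  have hkeys0 : cv0.keys = K := by
    rw [hcv0def, PySem.Dict.keys_foldl_insert K (fun _ _ => (0 : Int)) PySem.Dict.empty]
    rw [PySem.Dict.keys_empty, PySem.Set.update_nil_left, PySem.Set.ofList_eq_self_of_nodup K hnd]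
  -- A's violation dict, pointwise and key set
  have hkeysA : cvA.keys = K := by
    rw [hcvA, PySem.Dict.keys_foldl_modify bad 0 (fun _ _ => (· + 1)) cv0, hkeys0]
    exact pv_set_update_id K bad hbadK
  have hgA : ∀ k, cvA.getD k 0 = (bad.count k : Int) := by
    intro k
    rw [hcvA, PySem.Dict.getD_foldl_modify_add_one, hcv0, zero_add]
  -- B's run-length table is the multiset count
  have hct : ∀ k, counts.getD k 0 = (bad.count k : Int) := fun k => pv_counts_eq bad k
  -- B's violation dict: items by construction
  have hitemsB : cvB.items = K.map (fun k => (k, (bad.count k : Int))) := by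
    have hfun : cvB = K.foldl (fun cv k => cv.insert k ((bad.count k : Int))) PySem.Dict.empty := by
      rw [hcvB]
      congr 1
      funext cv k
      rw [hct]
    rw [hfun]
    have := PySem.Dict.items_foldl_insert_fresh K id (fun k => ((bad.count k : Int))) PySem.Dict.empty
      (fun a _ => by simp [PySem.Dict.contains_empty]) (by simpa using hnd)
    simpa using this
  -- the two dicts are equal
  have hAB : cvA = cvB := by
    apply PySem.Dict.ext
    rw [PySem.Dict.items_eq_map_keys cvA (by rw [hkeysA]; exact hnd) 0, hkeysA, hitemsB]
    exact List.map_congr_left (fun k _ => by rw [hgA])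
  -- assemble the triple
  obtain ⟨k, ks, hKcons⟩ : ∃ k ks, K = k :: ks := by
    cases h : K with
    | nil => exact absurd h hKne
    | cons k ks => exact ⟨k, ks, rfl⟩
  simp only [Prod.mk.injEq]
  refine ⟨trivial, by rw [hAB], ?_⟩
  have hkeysB : cvB.keys = K := by rw [← hAB]; exact hkeysA
  rw [hAB, hkeysB, hKcons]
  simp only []
  rw [pv_min_eq]
  simp only [Option.getD_some]
  have hfuneq : (fun (b x : String) => if cvB.getD x 0 > cvB.getD b 0 then x else b)
      = (fun b y => if -(cvB.getD y 0) < -(cvB.getD b 0) then y else b) := by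
    funext b y
    simp [neg_lt_neg_iff]
  rw [hfuneq]
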